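-- pv_equiv track=rewrite | github.com/MrBrantCode/unitest_baseline | mut_generate/mist_train_cf/cf_82624/solution.py | find_segments
-- ===== SOURCE A (Python) =====
-- def find_segments(input):
--     input = list(map(ord, input))
--     counter = 1
--     max_length = 1
--     length = 1
--
--     for i in range(1, len(input)):
--         if (input[i] > input[i-1]):
--             length += 1
--         else:
--             max_length = max(length, max_length)
--             length = 1
--             counter += 1
--
--     max_length = max(length, max_length)
--     return counter, max_length
-- ===== SOURCE B (Python) =====
-- def find_segments(input):
--     o = [ord(c) for c in input]
--     breaks = [i for i in range(1, len(o)) if o[i] <= o[i - 1]]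
--     bounds = [0] + breaks + [len(o)]
--     runs = [b - a for a, b in zip(bounds, bounds[1:])]
--     return len(breaks) + 1, max([1] + runs)
-- ===== Notes on version B (the rewrite author's own statement) =====
-- stated objective: alternative
-- what changed: Replaces A's single accumulating scan (counter/max_length/length state machine) with a two-phase build-then-aggregate structure: collect the break indices, derive the run lengths as differences of segment bounds, then take len(breaks)+1 and a 1-seeded max of the run lengths.
import Mathlib
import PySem

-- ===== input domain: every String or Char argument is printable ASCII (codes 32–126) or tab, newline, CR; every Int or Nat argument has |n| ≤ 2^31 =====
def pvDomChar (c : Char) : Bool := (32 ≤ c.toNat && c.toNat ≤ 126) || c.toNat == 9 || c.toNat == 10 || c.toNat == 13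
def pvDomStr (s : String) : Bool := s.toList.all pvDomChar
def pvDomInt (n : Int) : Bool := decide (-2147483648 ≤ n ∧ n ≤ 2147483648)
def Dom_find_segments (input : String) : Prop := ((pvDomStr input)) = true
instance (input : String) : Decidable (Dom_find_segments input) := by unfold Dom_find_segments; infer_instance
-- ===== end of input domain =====

-- B rebuilds the answer in two phases (collect the break indices, then aggregate the
-- bound-difference run lengths) instead of A's single accumulating scan; objective:
-- alternative decomposition, same cost.

-- ===== PORT A =====
def find_segments (input : String) : Int × Int :=
  let l : List Int := input.toList.map (fun c => (c.toNat : Int))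
  let st := (PySem.List.pyRange 1 (l.length : Int) 1).foldl
    (fun (st : Int × Int × Int) i =>
      if PySem.List.pyGetD l (i-1) 0 < PySem.List.pyGetD l i 0 then
        (st.1, st.2.1, st.2.2 + 1)
      else
        (st.1 + 1, max st.2.2 st.2.1, 1))
    (1, 1, 1)
  (st.1, max st.2.2 st.2.1)

-- ===== PORT B =====
def find_segments_alt (input : String) : Int × Int :=
  let o : List Int := input.toList.map (fun c => (c.toNat : Int))
  let breaks := (PySem.List.pyRange 1 (o.length : Int) 1).filter
    (fun i => decide (PySem.List.pyGetD o i 0 ≤ PySem.List.pyGetD o (i-1) 0))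
  let bounds : List Int := 0 :: (breaks ++ [(o.length : Int)])
  let runs := (bounds.zip bounds.tail).map (fun ab => ab.2 - ab.1)
  ((breaks.length : Int) + 1,
    match PySem.List.max? ((1 : Int) :: runs) (fun x => x) with
    | some m => m
    | none => 0)

-- ===== PRECONDITION & SPEC =====
def Spec_find_segments (input : String) (out : Int × Int) : Prop := out = find_segments_alt input
instance (input : String) (out : Int × Int) : Decidable (Spec_find_segments input out) := by unfold Spec_find_segments; infer_instance

-- ===== CLAIM (what is proved, stated in full; the proofs are below) =====
def Claim_equal_find_segments : Prop := ∀ (input : String), Dom_find_segments input → Spec_find_segments input (find_segments input)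

-- ===== LEMMAS AND PROOFS =====

-- break indices among 1..k-1 (B's 'breaks')
def pvBrk (o : List Int) (k : Int) : List Int :=
  (PySem.List.pyRange 1 k 1).filter
    (fun i => decide (PySem.List.pyGetD o i 0 ≤ PySem.List.pyGetD o (i-1) 0))

-- adjacent differences (B's 'runs' shape)
def pvDiffs (l : List Int) : List Int := (l.zip l.tail).map (fun ab => ab.2 - ab.1)

-- last break seen so far, 0 if none
def pvLast0 (bs : List Int) : Int := (0 :: bs).getLast (List.cons_ne_nil 0 bs)

theorem pvLast0_append (bs : List Int) (y : Int) : pvLast0 (bs ++ [y]) = y := by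
  unfold pvLast0
  simp

theorem pvDiffs_append (l : List Int) (h : l ≠ []) (y : Int) :
    pvDiffs (l ++ [y]) = pvDiffs l ++ [y - l.getLast h] := by
  induction l with
  | nil => simp at h
  | cons a t ih =>
    cases t with
    | nil => simp [pvDiffs]
    | cons b t' =>
      have := ih (by simp)
      simp only [pvDiffs, List.cons_append, List.zip_cons_cons, List.tail_cons, List.map_cons] at this ⊢
      rw [this]
      simp [List.getLast]

theorem pvMaxHead (t : List Int) :
    (match PySem.List.max? ((1:Int) :: t) (fun x => x) with | some m => m | none => 0) = t.foldl max 1 := by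
  rw [PySem.List.max?_id_cons]

theorem pvBrk_succ (o : List Int) (k : Nat) (hk : 1 ≤ k) :
    pvBrk o ((k : Int) + 1) =
      pvBrk o k ++ (if PySem.List.pyGetD o (k : Int) 0 ≤ PySem.List.pyGetD o ((k : Int)-1) 0 then [(k : Int)] else []) := by
  unfold pvBrk
  rw [PySem.List.pyRange_one_succ_right (by exact_mod_cast hk), List.filter_append]
  congr 1
  by_cases h : PySem.List.pyGetD o (k : Int) 0 ≤ PySem.List.pyGetD o ((k : Int)-1) 0
  · rw [if_pos h, List.filter_cons, if_pos (by exact decide_eq_true h), List.filter_nil]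
  · rw [if_neg h, List.filter_cons, if_neg (by simpa using h), List.filter_nil]

-- loop invariant: A's fold state after scanning indices 1..k-1 in terms of B's breaks
theorem pvInv (o : List Int) : ∀ k : Nat, 1 ≤ k →
    (PySem.List.pyRange 1 (k : Int) 1).foldl
      (fun (st : Int × Int × Int) i =>
        if PySem.List.pyGetD o (i-1) 0 < PySem.List.pyGetD o i 0 then
          (st.1, st.2.1, st.2.2 + 1)
        else
          (st.1 + 1, max st.2.2 st.2.1, 1))
      (1, 1, 1)
    = (((pvBrk o k).length : Int) + 1,
       (pvDiffs (0 :: pvBrk o k)).foldl max 1,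
       (k : Int) - pvLast0 (pvBrk o k)) := by
  intro k hk
  induction k with
  | zero => omega
  | succ k ih =>
    rcases Nat.lt_or_ge k 1 with h1 | h1
    · have hk1 : k = 0 := by omega
      subst hk1
      norm_num [PySem.List.pyRange_one_eq_nil, pvBrk, pvDiffs, pvLast0]
    · have hrec := ih h1
      have hsplit : PySem.List.pyRange 1 ((k : Int) + 1) 1 = PySem.List.pyRange 1 (k : Int) 1 ++ [(k : Int)] :=
        PySem.List.pyRange_one_succ_right (by exact_mod_cast h1)
      push_cast
      rw [hsplit, List.foldl_append, hrec, pvBrk_succ o k h1]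
      by_cases hbr : PySem.List.pyGetD o (k : Int) 0 ≤ PySem.List.pyGetD o ((k : Int)-1) 0
      · -- a break at index k: run ends
        rw [if_pos hbr]
        simp only [List.foldl_cons, List.foldl_nil]
        rw [if_neg (by omega)]
        have hform : ((0:Int) :: (pvBrk o k ++ [(k : Int)])) = ((0:Int) :: pvBrk o k) ++ [(k : Int)] := by
          simp
        have hd := pvDiffs_append ((0:Int) :: pvBrk o k) (List.cons_ne_nil _ _) (k : Int)
        refine Prod.ext (by push_cast; simp) (Prod.ext ?_ (by simp [pvLast0_append]))
        show max ((k : Int) - pvLast0 (pvBrk o k)) ((pvDiffs (0 :: pvBrk o k)).foldl max 1) = _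
        rw [hform, hd, List.foldl_append]
        simp only [List.foldl_cons, List.foldl_nil]
        rw [max_comm]
        rfl
      · -- no break at index k: run continues
        rw [if_neg hbr]
        simp only [List.foldl_cons, List.foldl_nil, List.append_nil]
        rw [if_pos (by omega)]
        refine Prod.ext rfl (Prod.ext rfl ?_)
        show (k : Int) - pvLast0 (pvBrk o k) + 1 = ((k : Int) + 1) - pvLast0 (pvBrk o k)
        ring

theorem pv_main (input : String) : find_segments input = find_segments_alt input := by
  set o : List Int := input.toList.map (fun c => (c.toNat : Int)) with ho
  have hA : find_segments input =
      ((((PySem.List.pyRange 1 (o.length : Int) 1).foldl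
          (fun (st : Int × Int × Int) i =>
            if PySem.List.pyGetD o (i-1) 0 < PySem.List.pyGetD o i 0 then
              (st.1, st.2.1, st.2.2 + 1)
            else
              (st.1 + 1, max st.2.2 st.2.1, 1))
          (1, 1, 1)).1),
        max ((PySem.List.pyRange 1 (o.length : Int) 1).foldl
          (fun (st : Int × Int × Int) i =>
            if PySem.List.pyGetD o (i-1) 0 < PySem.List.pyGetD o i 0 then
              (st.1, st.2.1, st.2.2 + 1)
            else
              (st.1 + 1, max st.2.2 st.2.1, 1))
          (1, 1, 1)).2.2
          ((PySem.List.pyRange 1 (o.length : Int) 1).foldl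
          (fun (st : Int × Int × Int) i =>
            if PySem.List.pyGetD o (i-1) 0 < PySem.List.pyGetD o i 0 then
              (st.1, st.2.1, st.2.2 + 1)
            else
              (st.1 + 1, max st.2.2 st.2.1, 1))
          (1, 1, 1)).2.1) := rfl
  have hB : find_segments_alt input =
      (((pvBrk o (o.length : Int)).length : Int) + 1,
        match PySem.List.max? ((1:Int) :: pvDiffs ((0:Int) :: (pvBrk o (o.length : Int) ++ [(o.length : Int)]))) (fun x => x) with
        | some m => m
        | none => 0) := rfl
  rw [hA, hB, pvMaxHead]
  rcases Nat.eq_zero_or_pos o.length with h0 | h1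
  · rw [h0]
    norm_num [PySem.List.pyRange_one_eq_nil, pvBrk, pvDiffs]
  · rw [pvInv o o.length h1]
    have hform : ((0:Int) :: (pvBrk o (o.length : Int) ++ [((o.length : Int))])) =
        ((0:Int) :: pvBrk o (o.length : Int)) ++ [((o.length : Int))] := by simp
    have hd := pvDiffs_append ((0:Int) :: pvBrk o (o.length : Int)) (List.cons_ne_nil _ _) ((o.length : Int))
    refine Prod.ext rfl ?_
    show max ((o.length : Int) - pvLast0 (pvBrk o (o.length : Int)))
        ((pvDiffs (0 :: pvBrk o (o.length : Int))).foldl max 1) = _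
    rw [hform, hd, List.foldl_append]
    simp only [List.foldl_cons, List.foldl_nil]
    rw [max_comm]
    rfl

-- ===== VERDICT (by name: the statement is the Claim_ definition above) =====
theorem find_segments_spec : Claim_equal_find_segments := by
  intro input _
  exact pv_main input
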